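-- pv_equiv track=rewrite | github.com/DnlRKorn/zincout | ZINCQuery_09_09_19.py | findEasyVendors
-- ===== SOURCE A (Python) =====
-- def findEasyVendors(urlist):
--     vendors = []
--     goodvendors = ["caymanchem", "chem-space", "indofinechemical", "matrixscientific", "mcule", "molport", "apexbt", "abovchem", "bldpharm", "targetmol", "trc-canada", "chemscene", "medchemexp", "sigma", "enamine","aksci"]
--     for row in urlist:
--         if("zinc15.docking.org" in row[0]):continue
--         for v in goodvendors:
--             if v in row[0]:
--                 vendors.append(row)
--                 break
--     return vendors
-- ===== SOURCE B (Python) =====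
-- def findEasyVendors(urlist):
--     goodvendors = ["caymanchem", "chem-space", "indofinechemical", "matrixscientific", "mcule", "molport", "apexbt", "abovchem", "bldpharm", "targetmol", "trc-canada", "chemscene", "medchemexp", "sigma", "enamine", "aksci"]
--     # vendor-major pass: build a parallel boolean mask, one vendor at a time
--     matched = [False] * len(urlist)
--     for v in goodvendors:
--         matched = [m or (v in row[0]) for m, row in zip(matched, urlist)]
--     return [row for m, row in zip(matched, urlist)
--             if m and "zinc15.docking.org" not in row[0]]
-- ===== Notes on version B (the rewrite author's own statement) =====
-- stated objective: alternative
-- what changed: Loop interchange: instead of scanning the 16 vendor substrings per row with an inner break-and-append loop, B makes one pass per vendor building a parallel boolean match mask over all rows, then filters the rows through the mask (and the zinc15 exclusion) in a final pass; order of urlist is preserved by the mask.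
import Mathlib
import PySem

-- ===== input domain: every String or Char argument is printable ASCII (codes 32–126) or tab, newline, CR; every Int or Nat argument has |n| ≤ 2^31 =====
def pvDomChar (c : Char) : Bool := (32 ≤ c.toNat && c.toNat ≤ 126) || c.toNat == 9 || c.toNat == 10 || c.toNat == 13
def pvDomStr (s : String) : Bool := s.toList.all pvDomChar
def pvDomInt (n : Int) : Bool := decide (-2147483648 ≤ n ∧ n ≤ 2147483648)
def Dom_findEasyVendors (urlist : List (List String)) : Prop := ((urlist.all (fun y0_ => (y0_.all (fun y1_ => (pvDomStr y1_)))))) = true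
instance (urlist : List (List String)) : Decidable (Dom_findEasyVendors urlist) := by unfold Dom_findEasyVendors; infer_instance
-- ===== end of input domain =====

-- B interchanges the loops: one pass per vendor builds a boolean match mask over all rows,
-- then a final pass filters the rows through the mask and the zinc15 exclusion (alternative
-- decomposition, same cost). Equivalence is about the return value; neither program mutates its argument.

-- ===== PORT A =====
def goodvendorsA : List String :=
  ["caymanchem", "chem-space", "indofinechemical", "matrixscientific", "mcule", "molport",
   "apexbt", "abovchem", "bldpharm", "targetmol", "trc-canada", "chemscene", "medchemexp",
   "sigma", "enamine", "aksci"]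

-- inner 'for v in goodvendors: if v in row[0]: vendors.append(row); break'
def aInner (row : List String) (gvs : List String) (vendors : List (List String)) : List (List String) :=
  match gvs with
  | [] => vendors
  | v :: rest =>
      if PySem.Str.isIn v (PySem.List.pyGetD row 0 "") then vendors ++ [row]
      else aInner row rest vendors

def findEasyVendors (urlist : List (List String)) : List (List String) :=
  urlist.foldl
    (fun vendors row =>
      if PySem.Str.isIn "zinc15.docking.org" (PySem.List.pyGetD row 0 "") then vendors
      else aInner row goodvendorsA vendors)
    []

-- ===== PORT B =====
def goodvendorsB : List String :=
  ["caymanchem", "chem-space", "indofinechemical", "matrixscientific", "mcule", "molport",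
   "apexbt", "abovchem", "bldpharm", "targetmol", "trc-canada", "chemscene", "medchemexp",
   "sigma", "enamine", "aksci"]

def findEasyVendors_alt (urlist : List (List String)) : List (List String) :=
  let matched :=
    goodvendorsB.foldl
      (fun m v => (m.zip urlist).map (fun p => p.1 || PySem.Str.isIn v (PySem.List.pyGetD p.2 0 "")))
      (List.replicate urlist.length false)
  ((matched.zip urlist).filter
      (fun p => p.1 && !(PySem.Str.isIn "zinc15.docking.org" (PySem.List.pyGetD p.2 0 "")))).map (·.2)

-- ===== PRECONDITION & SPEC =====
-- Pre_ excludes lists containing an empty row: there row[0] raises IndexError in both programs.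
def Pre_findEasyVendors (urlist : List (List String)) : Prop := ∀ row ∈ urlist, row ≠ []
instance (urlist : List (List String)) : Decidable (Pre_findEasyVendors urlist) := by unfold Pre_findEasyVendors; infer_instance
def pvWitness_findEasyVendors : List (List String) := [["http://mcule.com/x", "id1"], ["http://zinc15.docking.org/y", "id2"]]

def Spec_findEasyVendors (urlist : List (List String)) (out : List (List String)) : Prop := out = findEasyVendors_alt urlist
instance (urlist : List (List String)) (out : List (List String)) : Decidable (Spec_findEasyVendors urlist out) := by unfold Spec_findEasyVendors; infer_instance

-- ===== CLAIM (what is proved, stated in full; the proofs are below) =====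
def Claim_equal_findEasyVendors : Prop := ∀ (urlist : List (List String)), Dom_findEasyVendors urlist → Pre_findEasyVendors urlist → Spec_findEasyVendors urlist (findEasyVendors urlist)

-- ===== LEMMAS AND PROOFS =====

-- A's inner break-loop appends the row iff some vendor matches
theorem aInner_eq (row : List String) (gvs : List String) (vendors : List (List String)) :
    aInner row gvs vendors =
      if gvs.any (fun v => PySem.Str.isIn v (PySem.List.pyGetD row 0 "")) then vendors ++ [row]
      else vendors := by
  induction gvs with
  | nil => rfl
  | cons v rest ih =>
      show (if PySem.Str.isIn v (PySem.List.pyGetD row 0 "") then vendors ++ [row]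
            else aInner row rest vendors) = _
      rw [List.any_cons]
      by_cases h : PySem.Str.isIn v (PySem.List.pyGetD row 0 "") = true
      · rw [if_pos h, h, Bool.true_or, if_pos rfl]
      · rw [if_neg h, ih, Bool.not_eq_true] at *
        rw [h, Bool.false_or]

-- a fold that conditionally appends is a filter (abstract tests p, q)
theorem foldA (p q : List String → Bool) (l : List (List String)) (acc : List (List String)) :
    l.foldl (fun vendors row => if p row then vendors
                                else if q row then vendors ++ [row] else vendors) acc
      = acc ++ l.filter (fun row => !p row && q row) := by
  induction l generalizing acc with
  | nil => simp
  | cons r rs ih =>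
      simp only [List.foldl_cons, List.filter_cons]
      by_cases hp : p r = true
      · simp [hp, ih]
      · by_cases hq : q r = true <;> simp [hp, hq, ih]

-- one vendor pass on a pointwise mask stays pointwise (abstract test f)
theorem step_map (f : List String → Bool) (urlist : List (List String)) (g : List String → Bool) :
    ((urlist.map g).zip urlist).map (fun p => p.1 || f p.2) =
      urlist.map (fun row => g row || f row) := by
  induction urlist with
  | nil => rfl
  | cons r rs ih => simp [ih]

-- the vendor fold turns a pointwise mask into the any-mask (abstract test f)
theorem mask_fold (f : String → List String → Bool) (urlist : List (List String))
    (gvs : List String) (g : List String → Bool) :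
    gvs.foldl (fun m v => (m.zip urlist).map (fun p => p.1 || f v p.2)) (urlist.map g) =
      urlist.map (fun row => g row || gvs.any (fun v => f v row)) := by
  induction gvs generalizing g with
  | nil => simp
  | cons v rest ih =>
      rw [List.foldl_cons, step_map (f v) urlist g, ih]
      apply List.map_congr_left
      intro row _
      rw [List.any_cons]
      cases g row <;> cases f v row <;> simp

-- filtering a zipped pointwise mask is a plain filter (abstract test q)
theorem zip_filter (q : List String → Bool) (urlist : List (List String)) (g : List String → Bool) :
    (((urlist.map g).zip urlist).filter (fun p => p.1 && q p.2)).map (fun p => p.2) =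
      urlist.filter (fun row => g row && q row) := by
  induction urlist with
  | nil => rfl
  | cons r rs ih =>
      simp only [List.map_cons, List.zip_cons_cons, List.filter_cons]
      by_cases h : (g r && q r) = true
      · simp [h, ih]
      · simp [h, ih]

-- ===== VERDICT (by name: the statement is the Claim_ definition above) =====
theorem findEasyVendors_spec : Claim_equal_findEasyVendors := by
  intro urlist _ _
  unfold Spec_findEasyVendors findEasyVendors findEasyVendors_alt
  simp only [aInner_eq]
  rw [foldA (fun row => PySem.Str.isIn "zinc15.docking.org" (PySem.List.pyGetD row 0 ""))
        (fun row => goodvendorsA.any (fun v => PySem.Str.isIn v (PySem.List.pyGetD row 0 ""))) urlist []]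
  have hrep : List.replicate urlist.length false = urlist.map (fun _ => false) := by simp
  rw [List.nil_append, hrep,
      mask_fold (fun v row => PySem.Str.isIn v (PySem.List.pyGetD row 0 "")) urlist goodvendorsB
        (fun _ => false),
      zip_filter (fun row => !(PySem.Str.isIn "zinc15.docking.org" (PySem.List.pyGetD row 0 ""))) urlist
        (fun row => false || goodvendorsB.any (fun v => PySem.Str.isIn v (PySem.List.pyGetD row 0 "")))]
  apply List.filter_congr
  intro row _
  rw [Bool.false_or, Bool.and_comm]
  rfl
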